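-- pv_equiv track=rewrite | github.com/polyeval/polyeval-extra | src/polyeval_extra/target/visualbasic/value.py | by_string
-- ===== SOURCE A (Python) =====
-- def by_string(v: str):
--     res = '"'
--     for c in v:
--         if c == "\n":
--             res += '" & vbLf & "'
--         elif c == "\t":
--             res += '" & vbTab & "'
--         elif c == '"':
--             res += '""'
--         else:
--             res += c
--     res += '"'
--     return res
-- ===== SOURCE B (Python) =====
-- def by_string(v: str):
--     # Escape quotes first, then splice in the vbLf/vbTab literals (whose quotes must stay single).
--     return ('"'
--             + v.replace('"', '""')
--               .replace('\n', '" & vbLf & "')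
--               .replace('\t', '" & vbTab & "')
--             + '"')
-- ===== Notes on version B (the rewrite author's own statement) =====
-- stated objective: idiomatic
-- what changed: Replaced the per-character accumulator loop with a single expression of three chained str.replace passes (quote-doubling first, then newline and tab splices), turning one branching pass into whole-string substitution scans.
import Mathlib
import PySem

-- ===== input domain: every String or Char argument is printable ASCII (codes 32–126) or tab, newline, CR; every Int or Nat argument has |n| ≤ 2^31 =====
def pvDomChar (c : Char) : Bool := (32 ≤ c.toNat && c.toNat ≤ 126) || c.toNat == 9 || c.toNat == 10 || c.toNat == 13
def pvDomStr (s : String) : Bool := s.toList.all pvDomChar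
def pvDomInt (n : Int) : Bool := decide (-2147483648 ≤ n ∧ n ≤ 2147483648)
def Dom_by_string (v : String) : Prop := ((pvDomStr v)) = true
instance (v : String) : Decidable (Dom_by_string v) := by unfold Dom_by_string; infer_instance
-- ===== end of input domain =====

-- B replaces A's per-character accumulator loop with three chained whole-string replace passes
-- (quotes doubled first, then the vbLf/vbTab splices); objective: more idiomatic, same cost.

-- ===== PORT A =====
-- literal transliteration of A: an accumulator built left-to-right over the characters of v
def by_string (v : String) : String :=
  let res := "\""
  let res := v.toList.foldl (fun res c =>
    if c = '\n' then res ++ "\" & vbLf & \""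
    else if c = '\t' then res ++ "\" & vbTab & \""
    else if c = '"' then res ++ "\"\""
    else res ++ String.ofList [c]) res
  res ++ "\""

-- ===== PORT B =====
-- literal transliteration of B: three chained str.replace calls; PySem.Str.replace is Python's str.replace
def by_string_alt (v : String) : String :=
  "\"" ++
    (PySem.Str.replace
      (PySem.Str.replace
        (PySem.Str.replace v "\"" "\"\"")
        "\n" "\" & vbLf & \"")
      "\t" "\" & vbTab & \"")
  ++ "\""

-- ===== PRECONDITION & SPEC =====
def Spec_by_string (v : String) (out : String) : Prop := out = by_string_alt v
instance (v : String) (out : String) : Decidable (Spec_by_string v out) := by unfold Spec_by_string; infer_instance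

-- ===== CLAIM (what is proved, stated in full; the proofs are below) =====
def Claim_equal_by_string : Prop := ∀ (v : String), Dom_by_string v → Spec_by_string v (by_string v)

-- ===== LEMMAS AND PROOFS =====

-- replace with a one-character pattern is exactly a per-character flatMap
theorem replace_go_single (a : Char) (new : List Char) :
    ∀ (l : List Char) (fuel : Nat) (acc : List Char), l.length ≤ fuel →
      PySem.Chars.replace.go [a] new fuel l acc =
        acc.reverse ++ l.flatMap (fun c => if c = a then new else [c]) := by
  intro l
  induction l with
  | nil =>
      intro fuel acc _
      cases fuel <;> simp [PySem.Chars.replace.go]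
  | cons c t ih =>
      intro fuel acc h
      cases fuel with
      | zero => simp at h
      | succ n =>
          simp only [PySem.Chars.replace.go]
          by_cases hc : c = a
          · subst hc
            rw [if_pos (by simp [List.isPrefixOf])]
            simp only [List.length_cons, List.length_nil, Nat.zero_add, List.drop_succ_cons,
              List.drop_zero]
            rw [ih n (new.reverse ++ acc) (Nat.le_of_succ_le_succ (by simpa using h))]
            simp [List.flatMap_cons]
          · rw [if_neg (by simp [List.isPrefixOf]; intro h'; exact absurd h'.symm hc)]
            rw [ih n (c :: acc) (Nat.le_of_succ_le_succ (by simpa using h))]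
            simp [List.flatMap_cons, hc]

theorem replace_single (s : List Char) (a : Char) (new : List Char) :
    PySem.Chars.replace s [a] new = s.flatMap (fun c => if c = a then new else [c]) := by
  rw [PySem.Chars.replace]
  simp only [List.isEmpty_cons, Bool.false_eq_true, if_false]
  simpa using replace_go_single a new s s.length [] le_rfl

-- the per-character escape that both pipelines compute
def pvEnc (c : Char) : List Char :=
  if c = '\n' then "\" & vbLf & \"".toList
  else if c = '\t' then "\" & vbTab & \"".toList
  else if c = '"' then ['"', '"']
  else [c]

-- composing the three single-character substitutions character by character gives pvEnc
theorem chain_eq : ∀ (l : List Char),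
    List.flatMap (fun c => if c = '\t' then "\" & vbTab & \"".toList else [c])
      (List.flatMap (fun c => if c = '\n' then "\" & vbLf & \"".toList else [c])
        (List.flatMap (fun c => if c = '"' then "\"\"".toList else [c]) l))
      = List.flatMap pvEnc l := by
  intro l
  induction l with
  | nil => rfl
  | cons c t ih =>
      simp only [List.flatMap_cons, List.flatMap_append, ih]
      congr 1
      by_cases h1 : c = '\n'
      · subst h1; decide
      · by_cases h2 : c = '\t'
        · subst h2; decide
        · by_cases h3 : c = '"'
          · subst h3; decide
          · simp [pvEnc, h1, h2, h3]

theorem alt_toList (v : String) :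
    (by_string_alt v).toList = '"' :: (v.toList.flatMap pvEnc ++ ['"']) := by
  have hq : "\"".toList = ['"'] := by decide
  have hn : "\n".toList = ['\n'] := by decide
  have ht : "\t".toList = ['\t'] := by decide
  simp only [by_string_alt, String.toList_append, PySem.Str.toList_replace, hq, hn, ht,
    replace_single, chain_eq]
  rfl

-- A's loop, read on character lists: the accumulator grows by pvEnc c per character
theorem a_fold (l : List Char) : ∀ (res : String),
    (l.foldl (fun res c =>
      if c = '\n' then res ++ "\" & vbLf & \""
      else if c = '\t' then res ++ "\" & vbTab & \""
      else if c = '"' then res ++ "\"\""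
      else res ++ String.ofList [c]) res).toList
    = res.toList ++ l.flatMap pvEnc := by
  induction l with
  | nil => intro res; simp
  | cons c t ih =>
      intro res
      have hqq : "\"\"".toList = ['"', '"'] := by decide
      simp only [List.foldl_cons, List.flatMap_cons]
      split_ifs with h1 h2 h3
      · rw [ih]; simp [String.toList_append, pvEnc, h1]
      · rw [ih]; simp [String.toList_append, pvEnc, h2]
      · rw [ih]; simp [String.toList_append, pvEnc, h3, hqq]
      · rw [ih]; simp [String.toList_append, String.toList_ofList, pvEnc, h1, h2, h3]

theorem a_toList (v : String) :
    (by_string v).toList = '"' :: (v.toList.flatMap pvEnc ++ ['"']) := by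
  have hq : "\"".toList = ['"'] := by decide
  simp only [by_string, String.toList_append, a_fold, hq]
  simp

-- ===== VERDICT (by name: the statement is the Claim_ definition above) =====
theorem by_string_spec : Claim_equal_by_string := by
  intro v _
  unfold Spec_by_string
  rw [← String.toList_inj, a_toList, alt_toList]
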